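-- pv_equiv track=rewrite | github.com/Vadermit/AMOID | utils.py | list_intersection
-- ===== SOURCE A (Python) =====
-- def list_intersection(lst1, lst2, signal_bundle_dict):
--     lst3 = [value for value in lst1 if value in lst2]
--     remove_list = []
--     for i in range(len(lst3)):
--         try:
--             if (lst3[i] in signal_bundle_dict) and (lst3[i + 1] in signal_bundle_dict[lst3[i]]):
--                 remove_list.append(lst3[i + 1])
--         except:
--             pass
--     for rm in remove_list:
--         lst3.remove(rm)
--     return lst3
-- ===== SOURCE B (Python) =====
-- def list_intersection(lst1, lst2, signal_bundle_dict):
--     lst3 = [value for value in lst1 if value in lst2]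
--     # Count, per value, how many removals are queued (one scan over consecutive pairs).
--     pending = {}
--     for a, b in zip(lst3, lst3[1:]):
--         if a in signal_bundle_dict and b in signal_bundle_dict[a]:
--             pending[b] = pending.get(b, 0) + 1
--     # One filtering pass: skip the first pending[v] occurrences of each v.
--     out = []
--     for v in lst3:
--         if pending.get(v, 0) > 0:
--             pending[v] -= 1
--         else:
--             out.append(v)
--     return out
-- ===== Notes on version B (the rewrite author's own statement) =====
-- stated objective: alternative
-- what changed: Replaces the index loop with try/except plus repeated list.remove scans by a single zip pass that counts queued removals in a dict and one filtering pass that skips the first count[v] occurrences of each value.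
import Mathlib
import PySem

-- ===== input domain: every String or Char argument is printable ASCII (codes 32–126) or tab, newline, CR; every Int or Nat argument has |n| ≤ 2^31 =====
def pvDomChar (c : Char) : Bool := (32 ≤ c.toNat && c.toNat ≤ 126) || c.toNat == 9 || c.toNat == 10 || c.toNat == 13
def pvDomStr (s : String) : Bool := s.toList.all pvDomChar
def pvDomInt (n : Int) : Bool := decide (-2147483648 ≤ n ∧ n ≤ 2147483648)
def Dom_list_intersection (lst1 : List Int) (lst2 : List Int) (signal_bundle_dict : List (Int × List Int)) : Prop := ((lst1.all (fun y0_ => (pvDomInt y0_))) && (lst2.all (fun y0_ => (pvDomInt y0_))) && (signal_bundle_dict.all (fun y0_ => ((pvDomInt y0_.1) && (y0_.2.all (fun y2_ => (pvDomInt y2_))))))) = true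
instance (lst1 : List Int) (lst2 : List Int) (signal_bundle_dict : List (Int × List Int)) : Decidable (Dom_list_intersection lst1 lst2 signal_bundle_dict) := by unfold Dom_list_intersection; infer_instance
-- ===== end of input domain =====

-- B replaces A's try/except index loop plus repeated list.remove scans by one counting
-- pass over consecutive pairs and one filtering pass (objective: alternative algorithm).

-- ===== PORT A =====
-- one iteration of A's 'for i in range(len(lst3))' body; lst3[i+1] out of range (= the
-- IndexError swallowed by A's bare 'except') yields acc unchanged; range(len(..)) has
-- only nonnegative indices, so Nat indexing is exact here.
def pvStepA (signal_bundle_dict : List (Int × List Int)) (lst3 : List Int) (acc : List Int) (i : Nat) : List Int :=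
  match lst3[i]?, lst3[i + 1]? with
  | some a, some b =>
    match (PySem.Dict.mk signal_bundle_dict).get? a with
    | some ls => if ls.contains b then acc ++ [b] else acc
    | none => acc
  | _, _ => acc

def list_intersection (lst1 : List Int) (lst2 : List Int) (signal_bundle_dict : List (Int × List Int)) : List Int :=
  let lst3 := lst1.filter (fun value => lst2.contains value)
  let remove_list := (List.range lst3.length).foldl (pvStepA signal_bundle_dict lst3) []
  -- 'for rm in remove_list: lst3.remove(rm)'; the none branch (Python's ValueError) is
  -- unreachable because every queued value still occurs, but ported step for step.
  remove_list.foldl (fun l rm =>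
    match PySem.List.remove? l rm with
    | some l' => l'
    | none => l) lst3

-- ===== PORT B =====
-- Source B's counting loop over zip(lst3, lst3[1:]).
def pvPendingB (signal_bundle_dict : List (Int × List Int)) (pairs : List (Int × Int)) : PySem.Dict Int Int :=
  pairs.foldl (fun d ab =>
    if (PySem.Dict.mk signal_bundle_dict).contains ab.1
        && ((PySem.Dict.mk signal_bundle_dict).getD ab.1 []).contains ab.2
    then d.insert ab.2 (d.getD ab.2 0 + 1) else d) PySem.Dict.empty

-- Source B's filtering loop; 'pending[v] -= 1' runs only when pending.get(v,0) > 0, i.e.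
-- the key exists, so insert of (getD - 1) is exact.
def pvFilterB (d : PySem.Dict Int Int) : List Int → List Int
  | [] => []
  | v :: vs =>
    if d.getD v 0 > 0 then pvFilterB (d.insert v (d.getD v 0 - 1)) vs
    else v :: pvFilterB d vs

def list_intersection_alt (lst1 : List Int) (lst2 : List Int) (signal_bundle_dict : List (Int × List Int)) : List Int :=
  let lst3 := lst1.filter (fun value => lst2.contains value)
  pvFilterB (pvPendingB signal_bundle_dict (lst3.zip lst3.tail)) lst3

-- ===== PRECONDITION & SPEC =====
def Spec_list_intersection (lst1 : List Int) (lst2 : List Int) (signal_bundle_dict : List (Int × List Int)) (out : List Int) : Prop := out = list_intersection_alt lst1 lst2 signal_bundle_dict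
instance (lst1 : List Int) (lst2 : List Int) (signal_bundle_dict : List (Int × List Int)) (out : List Int) : Decidable (Spec_list_intersection lst1 lst2 signal_bundle_dict out) := by unfold Spec_list_intersection; infer_instance

-- ===== CLAIM (what is proved, stated in full; the proofs are below) =====
def Claim_equal_list_intersection : Prop := ∀ (lst1 : List Int) (lst2 : List Int) (signal_bundle_dict : List (Int × List Int)), Dom_list_intersection lst1 lst2 signal_bundle_dict → Spec_list_intersection lst1 lst2 signal_bundle_dict (list_intersection lst1 lst2 signal_bundle_dict)

-- ===== LEMMAS AND PROOFS =====

-- A's pair condition as a single step over a (previous, current) pair.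
def pvPairStep (sbd : List (Int × List Int)) (acc : List Int) (p : Int × Int) : List Int :=
  match (PySem.Dict.mk sbd).get? p.1 with
  | some ls => if ls.contains p.2 then acc ++ [p.2] else acc
  | none => acc

-- decrement-at-one-key on a counting function
def pvDec (f : Int → Int) (r : Int) : Int → Int := fun w => if w = r then f w - 1 else f w

-- the filtering pass, phrased over a pure counting function
def pvGo (f : Int → Int) : List Int → List Int
  | [] => []
  | v :: vs => if f v > 0 then pvGo (pvDec f v) vs else v :: pvGo f vs

-- A's index fold over range(len l) equals the fold over consecutive pairs.
theorem pvRange_eq_zip (sbd : List (Int × List Int)) :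
    ∀ (l : List Int) (acc : List Int),
      (List.range l.length).foldl (pvStepA sbd l) acc = (l.zip l.tail).foldl (pvPairStep sbd) acc := by
  intro l
  induction l with
  | nil => intro acc; rfl
  | cons x xs ih =>
    intro acc
    have hshift : ∀ (a : List Int) (i : Nat), pvStepA sbd (x :: xs) a (i + 1) = pvStepA sbd xs a i := by
      intro a i; simp [pvStepA]
    have hrange : (List.range (x :: xs).length).foldl (pvStepA sbd (x :: xs)) acc
        = (List.range xs.length).foldl (pvStepA sbd xs) (pvStepA sbd (x :: xs) acc 0) := by
      rw [List.length_cons, List.range_succ_eq_map, List.foldl_cons, List.foldl_map]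
      exact List.foldl_ext _ _ _ (fun a i _ => hshift a i)
    rw [hrange, ih]
    cases xs with
    | nil => rfl
    | cons y t =>
      have h0 : pvStepA sbd (x :: y :: t) acc 0 = pvPairStep sbd acc (x, y) := by
        simp [pvStepA, pvPairStep]
      simp only [List.tail_cons, List.zip_cons_cons, List.foldl_cons, h0]

-- A's pair step written as an if on B's guard
theorem pvPairStep_eq (sbd : List (Int × List Int)) (a : List Int) (p : Int × Int) :
    pvPairStep sbd a p
      = if (PySem.Dict.mk sbd).contains p.1
            && ((PySem.Dict.mk sbd).getD p.1 []).contains p.2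
        then a ++ [p.2] else a := by
  cases hq : (PySem.Dict.mk sbd).get? p.1 with
  | none =>
    rw [pvPairStep, hq, PySem.Dict.contains_eq_isSome_get?, hq]
    simp
  | some ls =>
    have hd : (PySem.Dict.mk sbd).getD p.1 [] = ls := PySem.Dict.getD_of_get?_eq_some _ _ hq
    rw [pvPairStep, hq, PySem.Dict.contains_eq_isSome_get?, hq, hd]
    simp

-- B's dict counts the queued removals of A's pair fold.
theorem pvPending_counts (sbd : List (Int × List Int)) :
    ∀ (P : List (Int × Int)) (d : PySem.Dict Int Int) (acc : List Int),
      (∀ v, d.getD v 0 = (acc.count v : Int)) →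
      ∀ v, (P.foldl (fun d ab =>
              if (PySem.Dict.mk sbd).contains ab.1
                  && ((PySem.Dict.mk sbd).getD ab.1 []).contains ab.2
              then d.insert ab.2 (d.getD ab.2 0 + 1) else d) d).getD v 0
            = ((P.foldl (pvPairStep sbd) acc).count v : Int) := by
  intro P
  induction P with
  | nil => intro d acc h v; exact h v
  | cons p P ih =>
    intro d acc h v
    simp only [List.foldl_cons, pvPairStep_eq sbd acc p]
    by_cases hg : ((PySem.Dict.mk sbd).contains p.1
        && ((PySem.Dict.mk sbd).getD p.1 []).contains p.2) = true
    · rw [if_pos hg, if_pos hg]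
      refine ih _ _ ?_ v
      intro w
      rw [PySem.Dict.getD_insert]
      by_cases hw : w = p.2
      · subst hw
        rw [if_pos rfl, h p.2]
        simp [List.count_append]
      · rw [if_neg hw, h w]
        have : p.2 ≠ w := fun hc => hw hc.symm
        simp [List.count_append, this]
    · rw [if_neg hg, if_neg hg]
      exact ih d acc h v

-- the queued removals are a sub-multiset of the second components
theorem pvPairFold_count_le (sbd : List (Int × List Int)) :
    ∀ (P : List (Int × Int)) (acc : List Int) (v : Int),
      (P.foldl (pvPairStep sbd) acc).count v ≤ acc.count v + (P.map Prod.snd).count v := by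
  intro P
  induction P with
  | nil => intro acc v; simp
  | cons p P ih =>
    intro acc v
    simp only [List.foldl_cons, List.map_cons, pvPairStep_eq]
    by_cases hg : ((PySem.Dict.mk sbd).contains p.1
        && ((PySem.Dict.mk sbd).getD p.1 []).contains p.2) = true
    · rw [if_pos hg]
      have := ih (acc ++ [p.2]) v
      simp only [List.count_append, List.count_cons] at *
      by_cases hw : p.2 = v <;> simp [hw] at * <;> omega
    · rw [if_neg hg]
      have := ih acc v
      simp [List.count_cons]
      omega

theorem pvMapSnd_zip_tail : ∀ (l : List Int), (l.zip l.tail).map Prod.snd = l.tail := by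
  intro l
  induction l with
  | nil => rfl
  | cons x xs ih =>
    cases xs with
    | nil => rfl
    | cons y t => simpa using ih

theorem pvFilterB_eq_go : ∀ (l : List Int) (d : PySem.Dict Int Int),
    pvFilterB d l = pvGo (fun v => d.getD v 0) l := by
  intro l
  induction l with
  | nil => intro d; rfl
  | cons v vs ih =>
    intro d
    simp only [pvFilterB, pvGo]
    by_cases h : d.getD v 0 > 0
    · rw [if_pos h, if_pos h, ih]
      congr 1
      funext w
      by_cases hw : w = v <;> simp [pvDec, PySem.Dict.getD_insert, hw]
    · rw [if_neg h, if_neg h, ih]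

theorem pvGo_zero : ∀ (l : List Int) (f : Int → Int), (∀ v, ¬ f v > 0) → pvGo f l = l := by
  intro l f h
  induction l with
  | nil => rfl
  | cons v vs ih => simp [pvGo, if_neg (h v), ih]

theorem pvGo_erase : ∀ (l : List Int) (f : Int → Int) (r : Int), f r > 0 → r ∈ l →
    pvGo f l = pvGo (pvDec f r) (l.erase r) := by
  intro l
  induction l with
  | nil => intro f r hf hr; cases hr
  | cons x xs ih =>
    intro f r hf hr
    by_cases hx : x = r
    · subst hx
      rw [List.erase_cons_head]
      simp [pvGo, if_pos hf]
    · have hmem : r ∈ xs := by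
        rcases List.mem_cons.mp hr with h | h
        · exact absurd h.symm hx
        · exact h
      rw [List.erase_cons_tail (by simpa using hx)]
      have hdx : pvDec f r x = f x := by simp [pvDec, hx]
      by_cases hfx : f x > 0
      · rw [pvGo, if_pos hfx, pvGo, hdx, if_pos hfx]
        have hrx : ¬ (r = x) := fun hh => hx hh.symm
        rw [ih (pvDec f x) r (by simpa [pvDec, hrx] using hf) hmem]
        congr 1
        funext w
        by_cases h1 : w = x <;> by_cases h2 : w = r <;>
          simp [pvDec, h1, h2] <;> simp_all
      · rw [pvGo, if_neg hfx, pvGo, hdx, if_neg hfx, ih f r hf hmem]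

-- repeated first-occurrence removal = counted filtering
theorem pvRemove_eq_go : ∀ (R l : List Int), (∀ v, R.count v ≤ l.count v) →
    R.foldl (fun l rm =>
      match PySem.List.remove? l rm with
      | some l' => l'
      | none => l) l = pvGo (fun v => (R.count v : Int)) l := by
  intro R
  induction R with
  | nil =>
    intro l _
    rw [List.foldl_nil, pvGo_zero]
    intro v; simp
  | cons r R ih =>
    intro l h
    have hr : r ∈ l := by
      have := h r
      simp at this
      exact List.count_pos_iff.mp (by omega)
    rw [List.foldl_cons, PySem.List.remove?_eq_some_erase l r hr]
    have hle : ∀ v, R.count v ≤ (l.erase r).count v := by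
      intro v
      have hv := h v
      by_cases hvr : v = r
      · subst hvr
        rw [List.count_erase_self]
        simp at hv
        omega
      · rw [List.count_erase_of_ne hvr]
        have hrv : ¬ (r = v) := fun hh => hvr hh.symm
        simp [hrv] at hv
        omega
    rw [ih (l.erase r) hle]
    have hfr : ((r :: R).count r : Int) > 0 := by
      rw [List.count_cons_self]; omega
    rw [pvGo_erase l (fun v => ((r :: R).count v : Int)) r hfr hr]
    congr 1
    funext w
    by_cases hw : w = r <;> simp [pvDec, hw, List.count_cons] <;> omega

-- ===== VERDICT (by name: the statement is the Claim_ definition above) =====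
theorem list_intersection_spec : Claim_equal_list_intersection := by
  intro lst1 lst2 sbd _
  unfold Spec_list_intersection list_intersection list_intersection_alt pvPendingB
  dsimp only
  set lst3 := lst1.filter (fun value => lst2.contains value) with hl3
  rw [pvRange_eq_zip]
  set R := (lst3.zip lst3.tail).foldl (pvPairStep sbd) [] with hR
  have hcnt : ∀ v, R.count v ≤ lst3.count v := by
    intro v
    have h1 := pvPairFold_count_le sbd (lst3.zip lst3.tail) [] v
    rw [pvMapSnd_zip_tail] at h1
    have h2 : lst3.tail.count v ≤ lst3.count v := by
      cases lst3 with
      | nil => simp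
      | cons a t => simp [List.count_cons]
    rw [← hR] at h1
    simp at h1
    omega
  rw [pvRemove_eq_go R lst3 hcnt, pvFilterB_eq_go]
  congr 1
  funext v
  rw [pvPending_counts sbd (lst3.zip lst3.tail) PySem.Dict.empty []
    (by intro w; simp [PySem.Dict.getD_empty])]
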